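-- pv_equiv track=rewrite | github.com/hcsullivan12/DarkGeant4-HunterSullivan | scripts/DarkGeant4HelperScripts/StoppingPowerVsResidualRange/__main__.py | GetPositionListFromFileContents
-- ===== SOURCE A (Python) =====
-- def GetPositionListFromFileContents(File):
--
-- 	Position = []
-- 	PositionChunk = []
--
-- 	FoundPositionStart = False
-- 	for i in range(len(File)):
--
-- 		if FoundPositionStart and len(File[i]) <= 1:
--
-- 			FoundPositionStart = False
-- 			if len(PositionChunk) != 0:
-- 				Position.append(list(PositionChunk))
-- 			PositionChunk = []
--
-- 		elif "Primary Particle Position" in File[i]: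
--
-- 			FoundPositionStart = True
-- 			i += 1
--
-- 		elif FoundPositionStart:
--
-- 			InsideDetector = "Detector" in File[i]
-- 			IonizedDetector = "hIoni" in File[i]
--
-- 			if InsideDetector and IonizedDetector:
-- 				PositionChunk.append(File[i].split())
--
-- 	# Fixes a super annoying bug
-- 	if len(PositionChunk) != 0:
-- 		Position.append(list(PositionChunk))
--
-- 	return Position
-- ===== SOURCE B (Python) =====
-- def GetPositionListFromFileContents(File):
--     # Split into blocks separated by near-blank lines, then process each block independently.
--     blocks = []
--     block = []
--     for line in File:
--         if len(line) <= 1: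
--             blocks.append(block)
--             block = []
--         else:
--             block.append(line)
--     blocks.append(block)
--
--     Position = []
--     for blk in blocks:
--         marker = None
--         for j, line in enumerate(blk):
--             if "Primary Particle Position" in line:
--                 marker = j
--                 break
--         if marker is None:
--             continue
--         chunk = [line.split() for line in blk[marker + 1:]
--                  if "Detector" in line and "hIoni" in line
--                  and "Primary Particle Position" not in line]
--         if chunk:
--             Position.append(chunk)
--     return Position
-- ===== Notes on version B (the rewrite author's own statement) =====
-- stated objective: alternative
-- what changed: A's single-pass three-variable state machine is replaced by a two-phase decomposition: first split the file into blocks at near-blank (len<=1) lines, then process each block independently by locating the marker line and collecting matching lines after it.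
import Mathlib
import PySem

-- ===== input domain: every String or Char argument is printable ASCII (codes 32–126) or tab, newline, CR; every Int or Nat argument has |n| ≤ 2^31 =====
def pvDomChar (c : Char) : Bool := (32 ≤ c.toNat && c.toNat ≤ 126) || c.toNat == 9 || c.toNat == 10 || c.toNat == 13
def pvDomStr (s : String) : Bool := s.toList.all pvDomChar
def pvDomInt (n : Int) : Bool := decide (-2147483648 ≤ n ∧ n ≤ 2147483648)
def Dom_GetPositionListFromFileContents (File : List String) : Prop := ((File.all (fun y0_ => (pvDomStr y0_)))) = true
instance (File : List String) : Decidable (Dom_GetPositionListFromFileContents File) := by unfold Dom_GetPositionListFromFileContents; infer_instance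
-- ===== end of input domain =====

-- B re-decomposes A's one-pass state machine: split the file into blocks at near-blank
-- lines, then handle each block independently (find the marker, collect matching lines).
-- Objective: alternative decomposition, same cost; equivalence proved on all inputs.


-- ===== PORT A =====
-- A's loop body; state = (Position, PositionChunk, FoundPositionStart).
-- (A's 'i += 1' has no effect in Python's for-range loop, so it is not ported;
--  'for i in range(len(File))' reading File[i] is the in-order traversal of File.)
def pvStepA (s : List (List (List String)) × List (List String) × Bool) (line : String) :
    List (List (List String)) × List (List String) × Bool :=
  if s.2.2 ∧ PySem.Str.len line ≤ 1 then
    ((if s.2.1.length ≠ 0 then s.1 ++ [s.2.1] else s.1), [], false)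
  else if PySem.Str.isIn "Primary Particle Position" line then
    (s.1, s.2.1, true)
  else if s.2.2 then
    (if PySem.Str.isIn "Detector" line ∧ PySem.Str.isIn "hIoni" line then
       (s.1, s.2.1 ++ [PySem.Str.split₀ line], s.2.2)
     else (s.1, s.2.1, s.2.2))
  else (s.1, s.2.1, s.2.2)

def GetPositionListFromFileContents (File : List String) : List (List (List String)) :=
  let s := File.foldl pvStepA ([], [], false)
  if s.2.1.length ≠ 0 then s.1 ++ [s.2.1] else s.1

-- ===== PORT B =====
-- Source B's first loop: accumulate (blocks, current block), splitting at lines with len <= 1.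
def pvSplitStep (acc : List (List String) × List String) (line : String) :
    List (List String) × List String :=
  if PySem.Str.len line ≤ 1 then (acc.1 ++ [acc.2], []) else (acc.1, acc.2 ++ [line])

-- Source B's inner enumerate-with-break: index of the first line containing the marker.
def pvFindMarker : List String → Option Nat
  | [] => none
  | l :: rest =>
    if PySem.Str.isIn "Primary Particle Position" l then some 0
    else (pvFindMarker rest).map (· + 1)

-- Source B's per-block body. blk[marker+1:] with a nonnegative start is List.drop (marker+1).
def pvProcBlock (pos : List (List (List String))) (blk : List String) :
    List (List (List String)) :=
  match pvFindMarker blk with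
  | none => pos
  | some j =>
    let chunk := ((blk.drop (j + 1)).filter
        (fun l => PySem.Str.isIn "Detector" l && PySem.Str.isIn "hIoni" l &&
                  !(PySem.Str.isIn "Primary Particle Position" l))).map PySem.Str.split₀
    if chunk = [] then pos else pos ++ [chunk]

def GetPositionListFromFileContents_alt (File : List String) : List (List (List String)) :=
  let s := File.foldl pvSplitStep ([], [])
  (s.1 ++ [s.2]).foldl pvProcBlock []

-- ===== PRECONDITION & SPEC =====
def Spec_GetPositionListFromFileContents (File : List String) (out : List (List (List String))) : Prop := out = GetPositionListFromFileContents_alt File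
instance (File : List String) (out : List (List (List String))) : Decidable (Spec_GetPositionListFromFileContents File out) := by unfold Spec_GetPositionListFromFileContents; infer_instance

-- ===== CLAIM (what is proved, stated in full; the proofs are below) =====
def Claim_equal_GetPositionListFromFileContents : Prop := ∀ (File : List String), Dom_GetPositionListFromFileContents File → Spec_GetPositionListFromFileContents File (GetPositionListFromFileContents File)

-- ===== LEMMAS AND PROOFS =====

-- Structural version of Source B's splitting loop: (current block, remaining blocks).
def pvSplitS : List String → List String × List (List String)
  | [] => ([], [])
  | l :: rest =>
    let r := pvSplitS rest
    if PySem.Str.len l ≤ 1 then ([], r.1 :: r.2) else (l :: r.1, r.2)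

def pvCond (l : String) : Bool :=
  PySem.Str.isIn "Detector" l && PySem.Str.isIn "hIoni" l &&
    !(PySem.Str.isIn "Primary Particle Position" l)

def pvCollect (blk : List String) : List (List String) :=
  (blk.filter pvCond).map PySem.Str.split₀

def pvAppendIf (pos : List (List (List String))) (c : List (List String)) :
    List (List (List String)) :=
  if c = [] then pos else pos ++ [c]

def pvFlush (s : List (List (List String)) × List (List String) × Bool) :
    List (List (List String)) :=
  if s.2.1.length ≠ 0 then s.1 ++ [s.2.1] else s.1

theorem pvSplit_bridge : ∀ (rest : List String) (bs : List (List String)) (cur : List String),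
    (rest.foldl pvSplitStep (bs, cur)).1 ++ [(rest.foldl pvSplitStep (bs, cur)).2]
      = bs ++ (cur ++ (pvSplitS rest).1) :: (pvSplitS rest).2 := by
  intro rest
  induction rest with
  | nil => intro bs cur; simp [pvSplitS]
  | cons l rest ih =>
    intro bs cur
    simp only [List.foldl_cons, pvSplitStep, pvSplitS]
    by_cases h : PySem.Str.len l ≤ 1
    · simp only [if_pos h]; rw [ih]; simp
    · simp only [if_neg h]; rw [ih]; simp

theorem pvNotIn_of_short (l : String) (h : PySem.Str.len l ≤ 1) :
    PySem.Str.isIn "Primary Particle Position" l = false := by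
  cases hv : PySem.Str.isIn "Primary Particle Position" l with
  | false => rfl
  | true =>
    exfalso
    have hinf := (PySem.Str.isIn_iff_infix _ _).mp hv
    have hle := List.IsInfix.length_le hinf
    have h25 : ("Primary Particle Position".toList.length) = 25 := by decide
    have hlen : PySem.Str.len l = (l.toList.length : Int) := by
      simp [PySem.Str.len_eq]
    rw [hlen] at h
    omega

-- Reduction lemmas for A's loop body in each of the five reachable situations.
theorem pvStepA_false_marker (pos : List (List (List String))) (chunk : List (List String))
    (l : String) (hm : PySem.Str.isIn "Primary Particle Position" l = true) :
    pvStepA (pos, chunk, false) l = (pos, chunk, true) := by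
  simp only [pvStepA]; rw [hm]; simp

theorem pvStepA_false_nomarker (pos : List (List (List String))) (chunk : List (List String))
    (l : String) (hm : PySem.Str.isIn "Primary Particle Position" l = false) :
    pvStepA (pos, chunk, false) l = (pos, chunk, false) := by
  simp only [pvStepA]; rw [hm]; simp

theorem pvStepA_true_blank (pos : List (List (List String))) (chunk : List (List String))
    (l : String) (hlen : PySem.Str.len l ≤ 1) :
    pvStepA (pos, chunk, true) l = (pvAppendIf pos chunk, [], false) := by
  simp only [pvStepA, pvAppendIf]
  rw [if_pos ⟨trivial, hlen⟩]
  cases chunk <;> simp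

theorem pvStepA_true_marker (pos : List (List (List String))) (chunk : List (List String))
    (l : String) (hlen : ¬ PySem.Str.len l ≤ 1)
    (hm : PySem.Str.isIn "Primary Particle Position" l = true) :
    pvStepA (pos, chunk, true) l = (pos, chunk, true) := by
  simp only [pvStepA]
  rw [if_neg (fun hh => hlen hh.2), hm]
  simp

theorem pvStepA_true_other (pos : List (List (List String))) (chunk : List (List String))
    (l : String) (hlen : ¬ PySem.Str.len l ≤ 1)
    (hm : PySem.Str.isIn "Primary Particle Position" l = false) :
    pvStepA (pos, chunk, true) l
      = (pos, (if pvCond l then chunk ++ [PySem.Str.split₀ l] else chunk), true) := by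
  simp only [pvStepA, pvCond]
  rw [if_neg (fun hh => hlen hh.2)]
  simp only [hm, Bool.false_eq_true, if_false, Bool.not_false, Bool.and_true]
  rw [if_pos trivial]
  by_cases hd : PySem.Str.isIn "Detector" l = true ∧ PySem.Str.isIn "hIoni" l = true
  · rw [if_pos hd, if_pos (by rw [hd.1, hd.2]; rfl)]
  · rw [if_neg hd, if_neg (fun hh => hd ⟨((Bool.and_eq_true _ _).mp hh).1,
      ((Bool.and_eq_true _ _).mp hh).2⟩)]

theorem pvCollect_cons (l : String) (t : List String) :
    pvCollect (l :: t)
      = if pvCond l then PySem.Str.split₀ l :: pvCollect t else pvCollect t := by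
  simp only [pvCollect, List.filter_cons]
  by_cases h : pvCond l = true
  · simp [h]
  · simp [h]

theorem pvCond_false_of_marker (l : String)
    (hm : PySem.Str.isIn "Primary Particle Position" l = true) : pvCond l = false := by
  simp only [pvCond, hm, Bool.not_true, Bool.and_false]

theorem pvProc_nil (pos : List (List (List String))) : pvProcBlock pos [] = pos := by
  simp [pvProcBlock, pvFindMarker]

theorem pvProc_marker (pos : List (List (List String))) (l : String) (h : List String)
    (hm : PySem.Str.isIn "Primary Particle Position" l = true) :
    pvProcBlock pos (l :: h) = pvAppendIf pos (pvCollect h) := by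
  simp only [pvProcBlock, pvFindMarker]
  rw [hm]
  simp only [List.drop_succ_cons]
  rfl

theorem pvProc_nomarker (pos : List (List (List String))) (l : String) (h : List String)
    (hm : PySem.Str.isIn "Primary Particle Position" l = false) :
    pvProcBlock pos (l :: h) = pvProcBlock pos h := by
  simp only [pvProcBlock, pvFindMarker]
  rw [hm]
  simp only [Bool.false_eq_true, if_false]
  cases hf : pvFindMarker h with
  | none => rfl
  | some j => simp only [Option.map_some, List.drop_succ_cons]

theorem pvMain : ∀ (rest : List String) (pos : List (List (List String))) (chunk : List (List String)),
    (pvFlush (rest.foldl pvStepA (pos, [], false))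
      = ((pvSplitS rest).1 :: (pvSplitS rest).2).foldl pvProcBlock pos)
    ∧ (pvFlush (rest.foldl pvStepA (pos, chunk, true))
      = (pvSplitS rest).2.foldl pvProcBlock (pvAppendIf pos (chunk ++ pvCollect (pvSplitS rest).1))) := by
  intro rest
  induction rest with
  | nil =>
    intro pos chunk
    constructor
    · simp [pvFlush, pvSplitS, pvProc_nil]
    · cases chunk <;> simp [pvFlush, pvSplitS, pvAppendIf, pvCollect]
  | cons l rest ih =>
    intro pos chunk
    by_cases hlen : PySem.Str.len l ≤ 1
    · have hm := pvNotIn_of_short l hlen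
      constructor
      · -- found = false, near-blank line: nothing happens
        rw [List.foldl_cons, pvStepA_false_nomarker pos [] l hm, (ih pos chunk).1]
        simp only [pvSplitS, if_pos hlen, List.foldl_cons, pvProc_nil]
      · -- found = true, near-blank line: flush the chunk
        rw [List.foldl_cons, pvStepA_true_blank pos chunk l hlen,
          (ih (pvAppendIf pos chunk) chunk).1]
        simp only [pvSplitS, if_pos hlen, pvCollect, List.filter_nil, List.map_nil,
          List.append_nil, List.foldl_cons]
    · cases hm : PySem.Str.isIn "Primary Particle Position" l with
      | true =>
        constructor
        · -- found = false, marker line: FoundPositionStart := True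
          rw [List.foldl_cons, pvStepA_false_marker pos [] l hm, (ih pos []).2]
          simp only [pvSplitS, if_neg hlen, List.foldl_cons, List.nil_append]
          rw [pvProc_marker pos l (pvSplitS rest).1 hm]
        · -- found = true, marker line: state unchanged
          rw [List.foldl_cons, pvStepA_true_marker pos chunk l hlen hm, (ih pos chunk).2]
          simp only [pvSplitS, if_neg hlen]
          rw [pvCollect_cons, if_neg (by rw [pvCond_false_of_marker l hm]; simp)]
      | false =>
        constructor
        · -- found = false, ordinary line: nothing happens
          rw [List.foldl_cons, pvStepA_false_nomarker pos [] l hm, (ih pos chunk).1]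
          simp only [pvSplitS, if_neg hlen, List.foldl_cons]
          rw [pvProc_nomarker pos l (pvSplitS rest).1 hm]
        · -- found = true, ordinary line: collect it iff it matches
          rw [List.foldl_cons, pvStepA_true_other pos chunk l hlen hm]
          by_cases hc : pvCond l = true
          · rw [if_pos hc, (ih pos (chunk ++ [PySem.Str.split₀ l])).2]
            simp only [pvSplitS, if_neg hlen]
            rw [pvCollect_cons, if_pos hc, List.append_assoc]
            rfl
          · rw [if_neg hc, (ih pos chunk).2]
            simp only [pvSplitS, if_neg hlen]
            rw [pvCollect_cons, if_neg hc]

-- ===== VERDICT (by name: the statement is the Claim_ definition above) =====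
theorem GetPositionListFromFileContents_spec : Claim_equal_GetPositionListFromFileContents := by
  intro File _
  show GetPositionListFromFileContents File = GetPositionListFromFileContents_alt File
  have hA : GetPositionListFromFileContents File
      = pvFlush (File.foldl pvStepA ([], [], false)) := rfl
  have hB := pvSplit_bridge File [] []
  have hM := (pvMain File [] []).1
  simp only [GetPositionListFromFileContents_alt, hA, hM]
  rw [hB]
  simp
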